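-- pv_equiv track=rewrite | github.com/seanhayes13/main | python/Caesarcipher/caesarcipher.py | twoKKeyDecrypt
-- ===== SOURCE A (Python) =====
-- def twoKKeyDecrypt(message, key1, key2):
--     decr=''
--     ctr = 0
--     alpha = "abcdefghijklmnopqrstuvwxyz"
--     lowerMsg = message.lower()
--     shiftedAlpha1 = shiftAlpha(26-key1)
--     shiftedAlpha2 = shiftAlpha(26-key2)
--     for c in lowerMsg:
--         currChar = lowerMsg[lowerMsg.index(c)]
--         if(currChar.isalpha() == False):
--             decr += currChar
--         if ctr%2==0:
--             decr += shiftedAlpha1[alpha.index(currChar)]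
--         if ctr%2==1:
--             decr += shiftedAlpha2[alpha.index(currChar)]
--         ctr+=1
--     return decr
--
-- def shiftAlpha(key):
--     alpha="abcdefghijklmnopqrstuvwxyz"
--     shiftedAlpha = ''
--     shiftedAlpha = alpha[key:] + alpha[0:key]
--     return shiftedAlpha
-- ===== SOURCE B (Python) =====
-- ALPHA = "abcdefghijklmnopqrstuvwxyz"
--
--
-- def _shifted(key):
--     k = 26 - key
--     return ALPHA[k:] + ALPHA[:k]
--
--
-- def _dec(shifted, c):
--     return shifted[ALPHA.index(c)]
--
--
-- def twoKKeyDecrypt(message, key1, key2):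
--     s1 = _shifted(key1)
--     s2 = _shifted(key2)
--     low = message.lower()
--     dece = [_dec(s1, c) for c in low[::2]]
--     deco = [_dec(s2, c) for c in low[1::2]]
--     parts = []
--     for e, o in zip(dece, deco):
--         parts.append(e)
--         parts.append(o)
--     if len(deco) < len(dece):
--         parts.append(dece[-1])
--     return ''.join(parts)
-- ===== Notes on version B (the rewrite author's own statement) =====
-- stated objective: faster
-- what changed: B lowercases the message once, splits it into the even-index and odd-index character streams (low[::2], low[1::2]), decrypts each whole stream with its own single shifted alphabet, and interleaves the two decrypted streams back, instead of A's single loop that re-derives each character via lowerMsg.index and switches keys on a parity counter.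
import Mathlib
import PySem

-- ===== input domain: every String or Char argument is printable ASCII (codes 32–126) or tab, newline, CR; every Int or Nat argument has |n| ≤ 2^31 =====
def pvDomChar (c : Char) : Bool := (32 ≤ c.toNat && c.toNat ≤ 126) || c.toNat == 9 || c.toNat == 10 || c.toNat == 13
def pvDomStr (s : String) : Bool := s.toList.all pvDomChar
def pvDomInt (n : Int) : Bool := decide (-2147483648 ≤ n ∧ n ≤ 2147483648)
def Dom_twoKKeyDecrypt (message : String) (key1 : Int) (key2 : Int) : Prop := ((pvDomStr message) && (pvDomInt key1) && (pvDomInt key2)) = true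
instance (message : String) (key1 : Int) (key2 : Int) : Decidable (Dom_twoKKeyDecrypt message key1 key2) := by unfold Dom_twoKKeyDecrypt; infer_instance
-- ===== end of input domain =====

-- B splits the lowered message into its even-index and odd-index streams, decrypts each stream
-- with its single key, and interleaves the results — instead of A's one loop with a parity
-- counter and a per-character lowerMsg.index scan.

def pvAlpha : List Char := "abcdefghijklmnopqrstuvwxyz".toList

-- ===== PORT A =====
-- shiftAlpha(key) = alpha[key:] + alpha[0:key]  (Python slices, exact via PySem.List.slice)
def pvShiftAlpha (key : Int) : List Char :=
  PySem.List.slice pvAlpha (some key) none ++ PySem.List.slice pvAlpha (some 0) (some key)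

-- the body of A's for-loop; 'lowerMsg[lowerMsg.index(c)]': str.index of the single character c
-- is the first-occurrence index (PySem.List.index?, a Nat in range, so List.getD is exact);
-- 'alpha.index(currChar)' raises ValueError on a non-letter — that branch (excluded by Pre_)
-- yields ' ' here.
def pvStepA (lowerMsg shiftedAlpha1 shiftedAlpha2 : List Char) (st : List Char × Int) (c : Char) :
    List Char × Int :=
  let currChar := match PySem.List.index? lowerMsg c with
    | some i => lowerMsg.getD i ' '
    | none => ' '                      -- unreachable: c is an element of lowerMsg
  let d1 := if PySem.Chars.isalpha currChar = false then st.1 ++ [currChar] else st.1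
  let d2 := if PySem.Int.mod st.2 2 == 0 then
      d1 ++ [match PySem.List.index? pvAlpha currChar with
             | some j => shiftedAlpha1.getD j ' '
             | none => ' ']            -- ValueError in Python; excluded by Pre_
    else d1
  let d3 := if PySem.Int.mod st.2 2 == 1 then
      d2 ++ [match PySem.List.index? pvAlpha currChar with
             | some j => shiftedAlpha2.getD j ' '
             | none => ' ']            -- ValueError in Python; excluded by Pre_
    else d2
  (d3, st.2 + 1)

def twoKKeyDecrypt (message : String) (key1 : Int) (key2 : Int) : String :=
  let lowerMsg := PySem.Chars.lower message.toList
  let shiftedAlpha1 := pvShiftAlpha (26 - key1)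
  let shiftedAlpha2 := pvShiftAlpha (26 - key2)
  let r := lowerMsg.foldl (pvStepA lowerMsg shiftedAlpha1 shiftedAlpha2)
    (([] : List Char), (0 : Int))
  String.mk r.1

-- ===== PORT B =====
def pvShifted (key : Int) : List Char :=
  let k := 26 - key
  PySem.List.slice pvAlpha (some k) none ++ PySem.List.slice pvAlpha (some 0) (some k)

-- _dec(shifted, c) = shifted[alpha.index(c)]; alpha.index raises ValueError on a non-letter —
-- that branch (excluded by Pre_) yields ' '; the found index is < 26 = len(shifted), getD exact.
def pvDec (shifted : List Char) (c : Char) : Char :=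
  match PySem.List.index? pvAlpha c with
  | some j => shifted.getD j ' '
  | none => ' '

def twoKKeyDecrypt_alt (message : String) (key1 : Int) (key2 : Int) : String :=
  let s1 := pvShifted key1
  let s2 := pvShifted key2
  let low := PySem.Chars.lower message.toList
  let ev := (PySem.List.slice? low none none 2).getD []      -- low[::2]; step ≠ 0, never none
  let od := (PySem.List.slice? low (some 1) none 2).getD []  -- low[1::2]; step ≠ 0, never none
  let dece := ev.map (pvDec s1)
  let deco := od.map (pvDec s2)
  let parts := (dece.zip deco).foldl (fun acc p => acc ++ [p.1, p.2]) ([] : List Char)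
  let parts := if deco.length < dece.length then
      parts ++ (match PySem.List.pyGet? dece (-1) with | some x => [x] | none => [])
    else parts
  String.mk parts

-- ===== PRECONDITION & SPEC =====
-- A calls alpha.index on every lowered character, so it raises ValueError unless every character
-- of the lowered message is a lowercase ASCII letter; Pre_ admits exactly the inputs A returns on.
def Pre_twoKKeyDecrypt (message : String) (key1 : Int) (key2 : Int) : Prop :=
  (PySem.Chars.lower message.toList).all PySem.Chars.islower = true
instance (message : String) (key1 : Int) (key2 : Int) : Decidable (Pre_twoKKeyDecrypt message key1 key2) := by unfold Pre_twoKKeyDecrypt; infer_instance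

def pvWitness_twoKKeyDecrypt : String × Int × Int := ("CaesarCipher", 3, 5)

def Spec_twoKKeyDecrypt (message : String) (key1 : Int) (key2 : Int) (out : String) : Prop := out = twoKKeyDecrypt_alt message key1 key2
instance (message : String) (key1 : Int) (key2 : Int) (out : String) : Decidable (Spec_twoKKeyDecrypt message key1 key2 out) := by unfold Spec_twoKKeyDecrypt; infer_instance

-- ===== CLAIM (what is proved, stated in full; the proofs are below) =====
def Claim_equal_twoKKeyDecrypt : Prop := ∀ (message : String) (key1 : Int) (key2 : Int), Dom_twoKKeyDecrypt message key1 key2 → Pre_twoKKeyDecrypt message key1 key2 → Spec_twoKKeyDecrypt message key1 key2 (twoKKeyDecrypt message key1 key2)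

-- ===== LEMMAS AND PROOFS =====

-- the even-index / odd-index streams of a list
def pvSplit2 : List Char → List Char × List Char
  | [] => ([], [])
  | [x] => ([x], [])
  | x :: y :: t => (x :: (pvSplit2 t).1, y :: (pvSplit2 t).2)

-- interleave, even stream first
def pvWeave : List Char → List Char → List Char
  | e, [] => e
  | [], _ :: _ => []
  | e :: es, o :: os => e :: o :: pvWeave es os

theorem pvSplit2_cons_cons (x y : Char) (t : List Char) :
    pvSplit2 (x :: y :: t) = (x :: (pvSplit2 t).1, y :: (pvSplit2 t).2) := rfl

theorem pvMod2_succ_of_zero {n : Int} (h : PySem.Int.mod n 2 = 0) :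
    PySem.Int.mod (n + 1) 2 = 1 := by
  rw [PySem.Int.mod_eq_emod_of_pos (by norm_num)] at h ⊢; omega

theorem pvMod2_succ_of_one {n : Int} (h : PySem.Int.mod n 2 = 1) :
    PySem.Int.mod (n + 1) 2 = 0 := by
  rw [PySem.Int.mod_eq_emod_of_pos (by norm_num)] at h ⊢; omega

theorem pvSplit2_len (l : List Char) :
    (pvSplit2 l).2.length ≤ (pvSplit2 l).1.length ∧
    (pvSplit2 l).1.length ≤ (pvSplit2 l).2.length + 1 := by
  induction l using pvSplit2.induct with
  | case1 => simp [pvSplit2]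
  | case2 x => simp [pvSplit2]
  | case3 x y t ih => rw [pvSplit2_cons_cons]; simpa using ih

theorem pvAux_even (l : List Char) :
    (List.range ((l.length + 1) / 2)).filterMap (fun k => l[2 * k]?) = (pvSplit2 l).1 := by
  induction l using pvSplit2.induct with
  | case1 => simp [pvSplit2]
  | case2 x => simp [pvSplit2, List.range_succ]
  | case3 x y t ih =>
    rw [pvSplit2_cons_cons]
    have hlen : ((x :: y :: t).length + 1) / 2 = (t.length + 1) / 2 + 1 := by
      simp only [List.length_cons]; omega
    rw [hlen, List.range_succ_eq_map, List.filterMap_cons]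
    simp only [Nat.mul_zero, List.getElem?_cons_zero, List.filterMap_map]
    rw [List.filterMap_congr (g := fun k => t[2 * k]?) (by
      intro k _
      simp only [Function.comp_apply]
      rw [show 2 * Nat.succ k = (2 * k + 1) + 1 by omega]
      simp [List.getElem?_cons_succ])]
    rw [ih]

theorem pvAux_odd (l : List Char) :
    (List.range (l.length / 2)).filterMap (fun k => l[2 * k + 1]?) = (pvSplit2 l).2 := by
  induction l using pvSplit2.induct with
  | case1 => simp [pvSplit2]
  | case2 x => simp [pvSplit2]
  | case3 x y t ih =>
    rw [pvSplit2_cons_cons]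
    have hlen : (x :: y :: t).length / 2 = t.length / 2 + 1 := by
      simp only [List.length_cons]; omega
    rw [hlen, List.range_succ_eq_map, List.filterMap_cons]
    simp only [Nat.mul_zero, Nat.zero_add, List.getElem?_cons_succ, List.getElem?_cons_zero,
      List.filterMap_map]
    rw [List.filterMap_congr (g := fun k => t[2 * k + 1]?) (by
      intro k _
      simp only [Function.comp_apply]
      rw [show 2 * Nat.succ k = (2 * k + 1) + 1 by omega]
      simp [List.getElem?_cons_succ])]
    rw [ih]

theorem pvSlice2_even (l : List Char) :
    PySem.List.slice? l none none 2 = some (pvSplit2 l).1 := by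
  rw [← pvAux_even]
  simp only [PySem.List.slice?, PySem.List.sliceIndices]
  norm_num
  rw [show (if 0 < l.length then (((l.length : Int) + 2 - 1) / 2).toNat else 0)
      = (l.length + 1) / 2 by split_ifs with h <;> omega]
  exact List.filterMap_congr (fun k _ => by
    rw [show ((2 : Int) * (k : Int)).toNat = 2 * k by omega])

theorem pvSlice2_odd (l : List Char) :
    PySem.List.slice? l (some 1) none 2 = some (pvSplit2 l).2 := by
  rw [← pvAux_odd]
  simp only [PySem.List.slice?, PySem.List.sliceIndices]
  norm_num
  by_cases h1 : 1 < l.length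
  · rw [show (if 1 < l.length then
          (((l.length : Int) - min 1 (l.length : Int) + 2 - 1) / 2).toNat else 0)
        = l.length / 2 by rw [if_pos h1]; omega]
    refine List.filterMap_congr (fun k _ => ?_)
    rw [show (min 1 ((l.length : Int)) + 2 * (k : Int)).toNat = 2 * k + 1 by omega]
  · rw [if_neg h1, show l.length / 2 = 0 by omega]
    simp

theorem pvPyGet_neg_one (l : List Char) : PySem.List.pyGet? l (-1) = l.getLast? := by
  rcases l with _ | ⟨x, t⟩
  · rfl
  · simp only [PySem.List.pyGet?, PySem.List.pyIdx?]
    rw [if_neg (by norm_num), if_pos (by simp)]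
    simp [List.getLast?_eq_getElem?]

-- A's loop body after the per-character clean-up
def pvStep (f1 f2 : Char → Char) (st : List Char × Int) (c : Char) : List Char × Int :=
  (st.1 ++ [if PySem.Int.mod st.2 2 == 0 then f1 c else f2 c], st.2 + 1)

theorem pvStepA_eq (low sh1 sh2 : List Char) (acc : List Char × Int) (c : Char)
    (hc : c ∈ low) (hl : PySem.Chars.islower c = true) :
    pvStepA low sh1 sh2 acc c = pvStep (pvDec sh1) (pvDec sh2) acc c := by
  obtain ⟨i, hi⟩ := Option.isSome_iff_exists.mp ((PySem.List.index?_isSome_iff low c).mpr hc)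
  obtain ⟨hik, hval, -⟩ := PySem.List.getElem_of_index?_eq_some hi
  simp only [PySem.List.index?_eq_idxOf?] at hi
  have hcur : low[i]?.getD ' ' = c := by rw [List.getElem?_eq_getElem hik]; exact hval
  have halpha : PySem.Chars.isalpha c = true := by simp [PySem.Chars.isalpha, hl]
  rcases PySem.Int.mod_two_eq acc.2 with h | h
  · have he : acc.2 % 2 = 0 := by
      rw [← PySem.Int.mod_eq_emod_of_pos (b := 2) (by norm_num)]; exact h
    simp [pvStepA, pvStep, pvDec, hi, hcur, halpha, he]
  · have he : acc.2 % 2 = 1 := by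
      rw [← PySem.Int.mod_eq_emod_of_pos (b := 2) (by norm_num)]; exact h
    simp [pvStepA, pvStep, pvDec, hi, hcur, halpha, he]

theorem pvFold_eq (f1 f2 : Char → Char) (l : List Char) (acc : List Char) (ctr : Int)
    (h : PySem.Int.mod ctr 2 = 0) :
    (l.foldl (pvStep f1 f2) (acc, ctr)).1
      = acc ++ pvWeave ((pvSplit2 l).1.map f1) ((pvSplit2 l).2.map f2) := by
  induction l using pvSplit2.induct generalizing acc ctr with
  | case1 => simp [pvSplit2, pvWeave]
  | case2 x =>
    have he : ctr % 2 = 0 := by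
      rw [← PySem.Int.mod_eq_emod_of_pos (b := 2) (by norm_num)]; exact h
    simp [pvSplit2, pvWeave, pvStep, he]
  | case3 x y t ih =>
    have h1 : PySem.Int.mod (ctr + 1) 2 = 1 := pvMod2_succ_of_zero h
    have h2 : PySem.Int.mod (ctr + 1 + 1) 2 = 0 := pvMod2_succ_of_one h1
    have he : ctr % 2 = 0 := by
      rw [← PySem.Int.mod_eq_emod_of_pos (b := 2) (by norm_num)]; exact h
    have hnd : ¬ (2 : Int) ∣ (ctr + 1) := by omega
    rw [pvSplit2_cons_cons]
    simp only [List.foldl_cons]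
    rw [show pvStep f1 f2 (acc, ctr) x = (acc ++ [f1 x], ctr + 1) by simp [pvStep, he]]
    rw [show pvStep f1 f2 (acc ++ [f1 x], ctr + 1) y = (acc ++ [f1 x] ++ [f2 y], ctr + 1 + 1) by
      simp [pvStep, hnd]]
    rw [ih _ _ h2]
    simp [pvWeave]

theorem pvZf_init (l : List (Char × Char)) (init : List Char) :
    l.foldl (fun acc p => acc ++ [p.1, p.2]) init
      = init ++ l.foldl (fun acc p => acc ++ [p.1, p.2]) [] := by
  induction l generalizing init with
  | nil => simp
  | cons p t ih =>
    simp only [List.foldl_cons]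
    rw [ih (init ++ [p.1, p.2]), ih ([] ++ [p.1, p.2])]
    simp

theorem pvZip_weave (e o : List Char) :
    o.length ≤ e.length → e.length ≤ o.length + 1 →
    (if o.length < e.length then
        (e.zip o).foldl (fun acc p => acc ++ [p.1, p.2]) ([] : List Char)
          ++ (match PySem.List.pyGet? e (-1) with | some x => [x] | none => [])
      else (e.zip o).foldl (fun acc p => acc ++ [p.1, p.2]) ([] : List Char))
      = pvWeave e o := by
  induction e, o using pvWeave.induct with
  | case1 e =>
    intro _h1 h2
    rcases e with _ | ⟨x, e'⟩
    · simp [pvWeave]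
    · rcases e' with _ | ⟨y, t⟩
      · simp [pvWeave, pvPyGet_neg_one]
      · simp at h2
  | case2 o os => intro h1 _h2; simp at h1
  | case3 x es y os ih =>
    intro h1 h2
    simp only [List.length_cons, Nat.add_le_add_iff_right] at h1 h2
    simp only [List.zip_cons_cons, List.foldl_cons, List.nil_append]
    rw [show pvWeave (x :: es) (y :: os) = x :: y :: pvWeave es os from rfl]
    rw [pvZf_init (es.zip os) [x, y]]
    by_cases hlt : os.length < es.length
    · rw [if_pos (by simpa using hlt)]
      rcases es with _ | ⟨z, es'⟩
      · exact absurd hlt (by simp)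
      · have hih := ih h1 h2
        rw [if_pos hlt] at hih
        rw [pvPyGet_neg_one] at hih ⊢
        rw [List.getLast?_cons_cons]
        rw [List.append_assoc, hih]
        simp
    · rw [if_neg (by simpa using hlt)]
      have hih := ih h1 h2
      rw [if_neg hlt] at hih
      rw [hih]
      simp

theorem pvB_eq (message : String) (key1 key2 : Int) :
    twoKKeyDecrypt_alt message key1 key2
      = String.mk (pvWeave
          ((pvSplit2 (PySem.Chars.lower message.toList)).1.map (pvDec (pvShifted key1)))
          ((pvSplit2 (PySem.Chars.lower message.toList)).2.map (pvDec (pvShifted key2)))) := by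
  simp only [twoKKeyDecrypt_alt, pvSlice2_even, pvSlice2_odd, Option.getD_some]
  congr 1
  apply pvZip_weave
  · simp only [List.length_map]; exact (pvSplit2_len _).1
  · simp only [List.length_map]; exact (pvSplit2_len _).2

theorem pvA_eq (message : String) (key1 key2 : Int)
    (hpre : (PySem.Chars.lower message.toList).all PySem.Chars.islower = true) :
    twoKKeyDecrypt message key1 key2
      = String.mk (pvWeave
          ((pvSplit2 (PySem.Chars.lower message.toList)).1.map (pvDec (pvShiftAlpha (26 - key1))))
          ((pvSplit2 (PySem.Chars.lower message.toList)).2.map (pvDec (pvShiftAlpha (26 - key2))))) := by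
  simp only [twoKKeyDecrypt]
  rw [PySem.List.foldl_congr_mem (PySem.Chars.lower message.toList)
        (pvStepA (PySem.Chars.lower message.toList) (pvShiftAlpha (26 - key1))
          (pvShiftAlpha (26 - key2)))
        (pvStep (pvDec (pvShiftAlpha (26 - key1))) (pvDec (pvShiftAlpha (26 - key2))))
        (([] : List Char), (0 : Int))
        (fun acc c hc => pvStepA_eq _ _ _ acc c hc (List.all_eq_true.mp hpre c hc))]
  rw [pvFold_eq _ _ _ _ _ (by decide)]
  simp

-- ===== VERDICT (by name: the statement is the Claim_ definition above) =====
theorem twoKKeyDecrypt_spec : Claim_equal_twoKKeyDecrypt := by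
  intro message key1 key2 _hd hpre
  unfold Pre_twoKKeyDecrypt at hpre
  unfold Spec_twoKKeyDecrypt
  rw [pvA_eq message key1 key2 hpre, pvB_eq]
  rfl
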